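-- pv_equiv track=rewrite | github.com/adechan/mentor-app | mentor-app-backend/src/collaborative_filtering/collaborative_filtering.py | create_ranking_table_for_given_books
-- ===== SOURCE A (Python) =====
-- def get_rating_for_given_book_and_user(user, book, ratings):
--     for rating in ratings:
--         if rating[0] == user:
--             given_ratings = rating[1]
--
--             for given_rating in given_ratings:
--
--                 if given_rating[0] == book:
--                     return given_rating[1]
--     return 0
--
-- def create_ranking_table_for_given_books(similar_users, books, ratings):
--     matrix = []
--
--     for user in similar_users:
--         row = []
--         for book in books:
--             rating = get_rating_for_given_book_and_user(user, book, ratings)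
--             row.append(rating)
--
--         matrix.append(row)
--
--     return matrix
-- ===== SOURCE B (Python) =====
-- def create_ranking_table_for_given_books(similar_users, books, ratings):
--     table = {}
--     for user, given_ratings in ratings:
--         for book, value in given_ratings:
--             table.setdefault((user, book), value)
--     return [[table.get((user, book), 0) for book in books] for user in similar_users]
-- ===== Notes on version B (the rewrite author's own statement) =====
-- stated objective: faster
-- what changed: Replaces the per-cell rescan of the whole ratings list with one pass that builds a first-occurrence (user,book)->value dict via setdefault, then fills the matrix by O(1) lookups.
import Mathlib
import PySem

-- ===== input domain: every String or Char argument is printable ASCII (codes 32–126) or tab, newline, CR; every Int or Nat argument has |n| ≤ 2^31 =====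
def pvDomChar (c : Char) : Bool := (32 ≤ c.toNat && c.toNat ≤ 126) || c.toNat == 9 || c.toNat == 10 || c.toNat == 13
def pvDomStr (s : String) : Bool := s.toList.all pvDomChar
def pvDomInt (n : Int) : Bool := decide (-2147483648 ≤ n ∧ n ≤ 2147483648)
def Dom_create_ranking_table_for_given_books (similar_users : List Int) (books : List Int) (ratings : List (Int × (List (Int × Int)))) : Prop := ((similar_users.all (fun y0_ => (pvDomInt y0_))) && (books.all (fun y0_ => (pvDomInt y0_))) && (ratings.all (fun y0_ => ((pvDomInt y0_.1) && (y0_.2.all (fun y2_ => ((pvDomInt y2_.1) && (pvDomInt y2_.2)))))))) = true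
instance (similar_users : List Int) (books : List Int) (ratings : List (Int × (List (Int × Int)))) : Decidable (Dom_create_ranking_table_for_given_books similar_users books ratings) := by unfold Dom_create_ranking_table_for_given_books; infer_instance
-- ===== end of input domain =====

-- B replaces A's per-cell rescan of the ratings list with a single pass building a
-- first-occurrence (user,book)->value dict, then fills the matrix by lookups (faster in a timing run).


-- ===== PORT A =====
-- inner 'for given_rating in given_ratings' loop with its early return
def findBookA (book : Int) : List (Int × Int) → Option Int
  | [] => none
  | (b, v) :: rest => if b == book then some v else findBookA book rest

def get_rating_for_given_book_and_user (user book : Int) : List (Int × (List (Int × Int))) → Int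
  | [] => 0
  | (u, given_ratings) :: rest =>
    if u == user then
      match findBookA book given_ratings with
      | some v => v
      | none => get_rating_for_given_book_and_user user book rest
    else get_rating_for_given_book_and_user user book rest

def create_ranking_table_for_given_books (similar_users : List Int) (books : List Int) (ratings : List (Int × (List (Int × Int)))) : List (List Int) :=
  similar_users.map (fun user =>
    books.map (fun book => get_rating_for_given_book_and_user user book ratings))

-- ===== PORT B =====
def buildTableB (ratings : List (Int × (List (Int × Int)))) : PySem.Dict (Int × Int) Int :=
  ratings.foldl (fun table p =>
    p.2.foldl (fun table q => table.setdefault (p.1, q.1) q.2) table) PySem.Dict.empty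

def create_ranking_table_for_given_books_alt (similar_users : List Int) (books : List Int) (ratings : List (Int × (List (Int × Int)))) : List (List Int) :=
  let table := buildTableB ratings
  similar_users.map (fun user => books.map (fun book => table.getD (user, book) 0))

-- ===== PRECONDITION & SPEC =====
def Spec_create_ranking_table_for_given_books (similar_users : List Int) (books : List Int) (ratings : List (Int × (List (Int × Int)))) (out : List (List Int)) : Prop := out = create_ranking_table_for_given_books_alt similar_users books ratings
instance (similar_users : List Int) (books : List Int) (ratings : List (Int × (List (Int × Int)))) (out : List (List Int)) : Decidable (Spec_create_ranking_table_for_given_books similar_users books ratings out) := by unfold Spec_create_ranking_table_for_given_books; infer_instance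

-- ===== CLAIM (what is proved, stated in full; the proofs are below) =====
def Claim_equal_create_ranking_table_for_given_books : Prop := ∀ (similar_users : List Int) (books : List Int) (ratings : List (Int × (List (Int × Int)))), Dom_create_ranking_table_for_given_books similar_users books ratings → Spec_create_ranking_table_for_given_books similar_users books ratings (create_ranking_table_for_given_books similar_users books ratings)

-- ===== LEMMAS AND PROOFS =====

-- Option-valued version of A's outer scan (none = fall through to 0)
def lookR (user book : Int) : List (Int × (List (Int × Int))) → Option Int
  | [] => none
  | (u, grs) :: rest => (if user = u then findBookA book grs else none).or (lookR user book rest)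

theorem get_rating_eq_lookR (user book : Int) (ratings : List (Int × (List (Int × Int)))) :
    get_rating_for_given_book_and_user user book ratings = (lookR user book ratings).getD 0 := by
  induction ratings with
  | nil => rfl
  | cons p rest ih =>
    obtain ⟨u, grs⟩ := p
    simp only [get_rating_for_given_book_and_user, lookR]
    by_cases hu : u = user
    · subst hu
      simp only [beq_self_eq_true, if_true]
      cases h : findBookA book grs with
      | none => simpa [h, Option.none_or] using ih
      | some v => simp [Option.or]
    · have hq : (u == user) = false := by simpa using hu
      have hq' : ¬ user = u := fun h => hu h.symm
      simp only [hq, if_neg hq', Bool.false_eq_true, if_false, Option.none_or]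
      exact ih

theorem innerFold_get? (user x y : Int) (grs : List (Int × Int)) (d : PySem.Dict (Int × Int) Int) :
    (grs.foldl (fun t q => t.setdefault (user, q.1) q.2) d).get? (x, y)
      = (d.get? (x, y)).or (if x = user then findBookA y grs else none) := by
  induction grs generalizing d with
  | nil => simp [findBookA, Option.or_none]
  | cons q rest ih =>
    obtain ⟨b, v⟩ := q
    simp only [List.foldl_cons]
    rw [ih]
    by_cases hc : d.contains (user, b)
    · rw [PySem.Dict.setdefault_of_contains _ _ hc]
      by_cases hx : x = user
      · subst hx
        by_cases hy : y = b
        · subst hy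
          have hs : (d.get? (x, y)).isSome := by
            rw [← PySem.Dict.contains_eq_isSome_get?]; exact hc
          cases h : d.get? (x, y) with
          | none => rw [h] at hs; simp at hs
          | some w => simp [Option.or]
        · simp [findBookA, show (b == y) = false by simpa using fun h => hy h.symm]
      · simp [hx]
    · have hc' : d.contains (user, b) = false := by simpa using hc
      rw [PySem.Dict.setdefault_of_not_contains _ _ hc']
      rw [PySem.Dict.get?_insert]
      by_cases hk : (x, y) = (user, b)
      · have hx : x = user := congrArg Prod.fst hk
        have hy : y = b := congrArg Prod.snd hk
        subst hx; subst hy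
        have hn : d.get? (x, y) = none := by
          rw [PySem.Dict.get?_eq_none_iff_contains]; exact hc'
        simp [hn, findBookA]
      · rw [if_neg hk]
        by_cases hx : x = user
        · subst hx
          have hy : y ≠ b := fun h => hk (by simp [h])
          simp [findBookA, show (b == y) = false by simpa using fun h => hy h.symm]
        · simp [hx]

theorem buildTable_get? (user book : Int) (ratings : List (Int × (List (Int × Int))))
    (d : PySem.Dict (Int × Int) Int) :
    (ratings.foldl (fun t p => p.2.foldl (fun t q => t.setdefault (p.1, q.1) q.2) t) d).get? (user, book)
      = (d.get? (user, book)).or (lookR user book ratings) := by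
  induction ratings generalizing d with
  | nil => simp [lookR, Option.or_none]
  | cons p rest ih =>
    obtain ⟨u, grs⟩ := p
    simp only [List.foldl_cons, lookR]
    rw [ih, innerFold_get?, Option.or_assoc]

theorem cell_eq (user book : Int) (ratings : List (Int × (List (Int × Int)))) :
    get_rating_for_given_book_and_user user book ratings
      = (buildTableB ratings).getD (user, book) 0 := by
  rw [get_rating_eq_lookR, PySem.Dict.getD_eq_get?_getD, buildTableB, buildTable_get?]
  simp [PySem.Dict.get?_empty, Option.none_or]

-- ===== VERDICT (by name: the statement is the Claim_ definition above) =====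
theorem create_ranking_table_for_given_books_spec : Claim_equal_create_ranking_table_for_given_books := by
  intro similar_users books ratings _
  unfold Spec_create_ranking_table_for_given_books
  unfold create_ranking_table_for_given_books create_ranking_table_for_given_books_alt
  simp only []
  refine List.map_congr_left (fun user _ => ?_)
  exact List.map_congr_left (fun book _ => cell_eq user book ratings)
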